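-- pv_equiv track=rewrite | github.com/Harshtherocking/Scimertech | model.py | pred_FuncGrp
-- ===== SOURCE A (Python) =====
-- Grps = {
--     'alcohol':1,
--     'carboxylic_acid':2,
--     'ketone':2,
--     'aldehyde':2,
--     'ether':3,
--     'ester':3,
--     'amino':4,
--     'nitro':4,
--     'cyano':5,
--     'phenyl':6,
--     'epoxy':3
-- }
--
-- def pred_FuncGrp (X):
--     grp = X
--     funcGrp = ""
--     for k in Grps.keys():
--         if Grps[k] == int(grp):
--             funcGrp += f" {k}"
--         pass
--
--     if funcGrp != "":
--         return funcGrp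
--     else:
--         return "Can't determine the functional group"
-- ===== SOURCE B (Python) =====
-- Grps = {
--     'alcohol':1,
--     'carboxylic_acid':2,
--     'ketone':2,
--     'aldehyde':2,
--     'ether':3,
--     'ester':3,
--     'amino':4,
--     'nitro':4,
--     'cyano':5,
--     'phenyl':6,
--     'epoxy':3
-- }
--
-- # reverse index: value -> ordered list of group names, built once
-- rev = {}
-- for _k, _v in Grps.items():
--     rev.setdefault(_v, []).append(_k)
--
-- def pred_FuncGrp(X):
--     names = rev.get(int(X))
--     if names is None:
--         return "Can't determine the functional group"
--     return ''.join(f' {n}' for n in names)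
-- ===== Notes on version B (the rewrite author's own statement) =====
-- stated objective: alternative
-- what changed: Replaces the per-call scan of every Grps entry with a module-level reverse index (value -> ordered name list) built once, so each call is a single keyed lookup plus a join.
import Mathlib
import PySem

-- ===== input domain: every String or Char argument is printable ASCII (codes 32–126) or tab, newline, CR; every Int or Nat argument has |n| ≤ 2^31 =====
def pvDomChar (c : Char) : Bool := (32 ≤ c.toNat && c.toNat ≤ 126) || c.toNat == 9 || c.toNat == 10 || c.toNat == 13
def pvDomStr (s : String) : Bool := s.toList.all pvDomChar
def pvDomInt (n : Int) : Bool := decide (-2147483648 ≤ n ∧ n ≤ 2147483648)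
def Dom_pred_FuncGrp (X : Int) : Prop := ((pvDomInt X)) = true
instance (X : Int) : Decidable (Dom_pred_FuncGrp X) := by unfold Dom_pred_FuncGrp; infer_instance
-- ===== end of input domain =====

-- B replaces A's per-call scan over all Grps entries by a reverse index (value -> ordered name list) built once; same return value everywhere.

-- ===== PORT A =====
def Grps : PySem.Dict String Int := PySem.Dict.ofList
  [("alcohol", 1), ("carboxylic_acid", 2), ("ketone", 2), ("aldehyde", 2),
   ("ether", 3), ("ester", 3), ("amino", 4), ("nitro", 4),
   ("cyano", 5), ("phenyl", 6), ("epoxy", 3)]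

-- for k in Grps.keys(): if Grps[k] == int(grp): funcGrp += f" {k}"   (Grps[k] never misses; int(grp) = X since X : Int)
def pred_FuncGrp (X : Int) : String :=
  let funcGrp := Grps.keys.foldl
    (fun funcGrp k => if Grps.getD k 0 == X then funcGrp ++ " " ++ k else funcGrp) ""
  if funcGrp != "" then funcGrp else "Can't determine the functional group"

-- ===== PORT B =====
-- rev.setdefault(v, []).append(k), built once over Grps.items()
def rev : PySem.Dict Int (List String) :=
  Grps.items.foldl (fun d kv => d.insert kv.2 (d.getD kv.2 [] ++ [kv.1])) PySem.Dict.empty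

-- ''.join(f' {n}' for n in names)
def pred_FuncGrp_alt (X : Int) : String :=
  match rev.get? X with
  | none => "Can't determine the functional group"
  | some names => String.join (names.map (fun n => " " ++ n))

-- ===== PRECONDITION & SPEC =====
def Spec_pred_FuncGrp (X : Int) (out : String) : Prop := out = pred_FuncGrp_alt X
instance (X : Int) (out : String) : Decidable (Spec_pred_FuncGrp X out) := by unfold Spec_pred_FuncGrp; infer_instance

-- ===== CLAIM (what is proved, stated in full; the proofs are below) =====
def Claim_equal_pred_FuncGrp : Prop := ∀ (X : Int), Dom_pred_FuncGrp X → Spec_pred_FuncGrp X (pred_FuncGrp X)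

-- ===== LEMMAS AND PROOFS =====
theorem eq_outside : ∀ (X : Int), X ≠ 1 → X ≠ 2 → X ≠ 3 → X ≠ 4 → X ≠ 5 → X ≠ 6 →
    pred_FuncGrp X = pred_FuncGrp_alt X := by
  intro X h1 h2 h3 h4 h5 h6
  simp [pred_FuncGrp, pred_FuncGrp_alt, Grps, rev, PySem.Dict.ofList, PySem.Dict.getD,
        PySem.Dict.get?, PySem.Dict.insert, PySem.Dict.empty, PySem.Dict.keys, PySem.Dict.update, PySem.Dict.contains,
        Ne.symm h1, Ne.symm h2, Ne.symm h3, Ne.symm h4, Ne.symm h5, Ne.symm h6]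

-- ===== VERDICT (by name: the statement is the Claim_ definition above) =====
theorem pred_FuncGrp_spec : Claim_equal_pred_FuncGrp := by
  intro X _
  unfold Spec_pred_FuncGrp
  by_cases h1 : X = 1; · subst h1; decide
  by_cases h2 : X = 2; · subst h2; decide
  by_cases h3 : X = 3; · subst h3; decide
  by_cases h4 : X = 4; · subst h4; decide
  by_cases h5 : X = 5; · subst h5; decide
  by_cases h6 : X = 6; · subst h6; decide
  exact eq_outside X h1 h2 h3 h4 h5 h6
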